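-- pv_equiv track=rewrite | github.com/iRedPaul/pdftopdfa | src/pdftopdfa/fonts/tounicode.py | filter_invalid_unicode_values
-- ===== SOURCE A (Python) =====
-- INVALID_UNICODE_VALUES = frozenset({0x0000, 0xFEFF, 0xFFFE})
--
-- _SURROGATE_RANGE = range(0xD800, 0xE000)
--
-- def _is_invalid_unicode(val: int) -> bool:
--     """Return True if a Unicode value is forbidden in PDF/A ToUnicode CMaps."""
--     return val in INVALID_UNICODE_VALUES or val in _SURROGATE_RANGE
--
-- def filter_invalid_unicode_values(
--     code_to_unicode: dict[int, int],
-- ) -> dict[int, int]: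
--     """Replaces forbidden Unicode values with Private Use Area codepoints.
--
--     PDF/A (veraPDF rule 6.2.11.7.2) forbids U+0000, U+FEFF, and U+FFFE
--     in ToUnicode mappings. This replaces them with PUA codepoints (U+E000+)
--     while avoiding collisions with existing PUA values.
--
--     Args:
--         code_to_unicode: Mapping from character codes to Unicode codepoints.
--
--     Returns:
--         New mapping with invalid values replaced by PUA codepoints.
--     """
--     if not any(_is_invalid_unicode(v) for v in code_to_unicode.values()):
--         return code_to_unicode
--
--     # Collect existing PUA values to avoid collisions
--     existing_pua = {v for v in code_to_unicode.values() if 0xE000 <= v <= 0xF8FF}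
--     next_pua = 0xE000
--     result = {}
--
--     for code, unicode_val in code_to_unicode.items():
--         if _is_invalid_unicode(unicode_val):
--             # Find next available PUA codepoint
--             while next_pua in existing_pua and next_pua <= 0xF8FF:
--                 next_pua += 1
--             if next_pua <= 0xF8FF:
--                 result[code] = next_pua
--                 existing_pua.add(next_pua)
--                 next_pua += 1
--             # else: PUA exhausted, skip this entry
--         else:
--             result[code] = unicode_val
--
--     return result
-- ===== SOURCE B (Python) =====
-- INVALID_UNICODE_VALUES = frozenset({0x0000, 0xFEFF, 0xFFFE})
--
-- _SURROGATE_RANGE = range(0xD800, 0xE000)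
--
--
-- def _is_invalid_unicode(val: int) -> bool:
--     return val in INVALID_UNICODE_VALUES or val in _SURROGATE_RANGE
--
--
-- def filter_invalid_unicode_values(code_to_unicode):
--     """Replace forbidden Unicode values with PUA codepoints.
--
--     Instead of scanning the PUA range with a cursor, sort the already-used PUA
--     values and collect the free codepoints from the gaps between consecutive
--     used values; then hand them out by position to the invalid entries."""
--     need = sum(1 for v in code_to_unicode.values() if _is_invalid_unicode(v))
--     if need == 0:
--         return code_to_unicode
--
--     used = sorted({v for v in code_to_unicode.values() if 0xE000 <= v <= 0xF8FF})
--     free = []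
--     prev = 0xE000
--     for u in used + [0xF900]:
--         free.extend(range(prev, u))
--         prev = u + 1
--     free = free[:need]
--
--     result = {}
--     j = 0
--     for code, v in code_to_unicode.items():
--         if _is_invalid_unicode(v):
--             if j < len(free):
--                 result[code] = free[j]
--             j += 1
--         else:
--             result[code] = v
--     return result
-- ===== Notes on version B (the rewrite author's own statement) =====
-- stated objective: alternative
-- what changed: A scans the PUA range with a mutable cursor plus a growing exclusion set, searching forward per replacement; B instead sorts the used PUA values once, collects the free codepoints from the gaps between consecutive used values, truncates that free list to the number of invalid entries, and assigns them positionally in the final pass.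
import Mathlib
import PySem

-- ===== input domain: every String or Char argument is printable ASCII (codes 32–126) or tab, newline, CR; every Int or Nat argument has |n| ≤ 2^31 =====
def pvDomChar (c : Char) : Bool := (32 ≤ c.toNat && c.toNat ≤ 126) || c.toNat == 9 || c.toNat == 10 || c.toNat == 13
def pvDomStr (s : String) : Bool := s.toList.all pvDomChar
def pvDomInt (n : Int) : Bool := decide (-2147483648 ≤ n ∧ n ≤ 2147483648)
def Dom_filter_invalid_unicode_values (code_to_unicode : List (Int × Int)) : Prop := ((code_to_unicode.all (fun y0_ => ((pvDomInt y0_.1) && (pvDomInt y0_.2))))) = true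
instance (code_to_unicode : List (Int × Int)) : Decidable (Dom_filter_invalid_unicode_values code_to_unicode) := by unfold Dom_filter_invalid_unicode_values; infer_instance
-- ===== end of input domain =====

-- B replaces A's forward-scanning cursor with a sort of the used PUA values, collecting
-- the free codepoints from the gaps between them and handing them out by position
-- (objective: alternative algorithm, same result).

-- ===== PORT A =====

-- _is_invalid_unicode (module-level helper, shared by both Pythons)
def pvAIsInvalid (val : Int) : Bool :=
  (val == 0x0000 || val == 0xFEFF || val == 0xFFFE) || (0xD800 ≤ val && val < 0xE000)

-- the inner 'while next_pua in existing_pua and next_pua <= 0xF8FF: next_pua += 1'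
def pvAWhile (existing : PySem.Set Int) (next_pua : Int) : Int :=
  if h : PySem.Set.contains existing next_pua = true ∧ next_pua ≤ 0xF8FF then
    pvAWhile existing (next_pua + 1)
  else next_pua
termination_by (0xF900 - next_pua).toNat
decreasing_by omega

-- the 'for code, unicode_val in code_to_unicode.items()' loop with its mutable state
def pvALoop : List (Int × Int) → PySem.Set Int → Int → PySem.Dict Int Int → PySem.Dict Int Int
  | [], _, _, result => result
  | (code, unicode_val) :: rest, existing, next_pua, result =>
    if pvAIsInvalid unicode_val then
      let np := pvAWhile existing next_pua
      if np ≤ 0xF8FF then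
        pvALoop rest (PySem.Set.add existing np) (np + 1) (result.insert code np)
      else
        pvALoop rest existing np result
    else
      pvALoop rest existing next_pua (result.insert code unicode_val)

def filter_invalid_unicode_values (code_to_unicode : List (Int × Int)) : List (Int × Int) :=
  if ¬ (code_to_unicode.any fun p => pvAIsInvalid p.2) then code_to_unicode
  else
    let existing_pua : PySem.Set Int :=
      PySem.Set.ofList ((code_to_unicode.map Prod.snd).filter fun v => 0xE000 ≤ v && v ≤ 0xF8FF)
    (pvALoop code_to_unicode existing_pua 0xE000 PySem.Dict.empty).items

-- ===== PORT B =====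

-- B shares the module-level helper _is_invalid_unicode (pvAIsInvalid above)

-- 'for u in used + [0xF900]: free.extend(range(prev, u)); prev = u + 1'
def pvBGaps : Int → List Int → List Int
  | _, [] => []
  | prev, u :: rest => PySem.List.pyRange prev u 1 ++ pvBGaps (u + 1) rest

-- the final pass: positional assignment 'if j < len(free): result[code] = free[j]; j += 1'
def pvBFinal : List (Int × Int) → List Int → Nat → PySem.Dict Int Int → PySem.Dict Int Int
  | [], _, _, result => result
  | (code, v) :: rest, free, j, result =>
    if pvAIsInvalid v then
      match free[j]? with
      | some p => pvBFinal rest free (j + 1) (result.insert code p)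
      | none => pvBFinal rest free (j + 1) result
    else
      pvBFinal rest free j (result.insert code v)

def filter_invalid_unicode_values_alt (code_to_unicode : List (Int × Int)) : List (Int × Int) :=
  -- need = sum(1 for v in … if _is_invalid_unicode(v))  (a count, hence Nat here)
  let need : Nat := code_to_unicode.countP fun p => pvAIsInvalid p.2
  if need = 0 then code_to_unicode
  else
    let used : List Int :=
      PySem.List.sorted
        (PySem.Set.ofList ((code_to_unicode.map Prod.snd).filter fun v => 0xE000 ≤ v && v ≤ 0xF8FF))
        (fun x => x) false
    let free : List Int := (pvBGaps 0xE000 (used ++ [0xF900])).take need  -- free[:need]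
    (pvBFinal code_to_unicode free 0 PySem.Dict.empty).items

-- ===== PRECONDITION & SPEC =====
def Spec_filter_invalid_unicode_values (code_to_unicode : List (Int × Int)) (out : List (Int × Int)) : Prop := out = filter_invalid_unicode_values_alt code_to_unicode
instance (code_to_unicode : List (Int × Int)) (out : List (Int × Int)) : Decidable (Spec_filter_invalid_unicode_values code_to_unicode out) := by unfold Spec_filter_invalid_unicode_values; infer_instance

-- ===== CLAIM (what is proved, stated in full; the proofs are below) =====
def Claim_equal_filter_invalid_unicode_values : Prop := ∀ (code_to_unicode : List (Int × Int)), Dom_filter_invalid_unicode_values code_to_unicode → Spec_filter_invalid_unicode_values code_to_unicode (filter_invalid_unicode_values code_to_unicode)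

-- ===== LEMMAS AND PROOFS =====

-- proof-side normal form of both loops: consume the free pool from the head
def pvBHead : List (Int × Int) → List Int → PySem.Dict Int Int → PySem.Dict Int Int
  | [], _, result => result
  | (code, v) :: rest, pool, result =>
    if pvAIsInvalid v then
      match pool with
      | p :: ps => pvBHead rest ps (result.insert code p)
      | [] => pvBHead rest [] result
    else
      pvBHead rest pool (result.insert code v)

-- A's while loop, read off the residual pool: it returns the pool's head when the
-- pool is nonempty, and runs off to 0xF900 when the pool is empty.
theorem pvAWhile_spec (np : Int) (hnp : np ≤ 0xF900) (existing : PySem.Set Int) :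
    (((PySem.List.pyRange np 0xF900 1).filter fun c => !(PySem.Set.contains existing c)) = [] →
      pvAWhile existing np = 0xF900) ∧
    (∀ c ps, ((PySem.List.pyRange np 0xF900 1).filter fun c => !(PySem.Set.contains existing c)) = c :: ps →
      pvAWhile existing np = c ∧ np ≤ c ∧ c ≤ 0xF8FF ∧
      ps = (PySem.List.pyRange (c + 1) 0xF900 1).filter fun x => !(PySem.Set.contains existing x)) := by
  by_cases hlt : np < 0xF900
  · rw [PySem.List.pyRange_one_cons hlt]
    by_cases hc : PySem.Set.contains existing np = true
    · have ih := pvAWhile_spec (np + 1) (by omega) existing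
      rw [pvAWhile, dif_pos ⟨hc, by omega⟩]
      simp only [List.filter_cons, hc, Bool.not_true, Bool.false_eq_true, ite_false]
      constructor
      · exact ih.1
      · intro c ps h
        obtain ⟨h1, h2, h3, h4⟩ := ih.2 c ps h
        exact ⟨h1, by omega, h3, h4⟩
    · have hc' : PySem.Set.contains existing np = false := by
        cases h : PySem.Set.contains existing np
        · rfl
        · exact absurd h hc
      rw [pvAWhile, dif_neg (by intro h; exact hc h.1)]
      simp only [List.filter_cons, hc', Bool.not_false, ite_true]
      constructor
      · intro h; exact absurd h (by simp)
      · intro c ps h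
        injection h with h1 h2
        subst h1; subst h2
        exact ⟨rfl, le_refl _, by omega, rfl⟩
  · have hnp' : np = 0xF900 := by omega
    subst hnp'
    rw [PySem.List.pyRange_one_eq_nil (by omega)]
    constructor
    · intro _
      rw [pvAWhile, dif_neg (by intro h; omega)]
    · intro c ps h; exact absurd h (by simp)
termination_by (0xF900 - np).toNat
decreasing_by omega

-- elements of the residual pool beyond a freshly assigned codepoint c never equal c,
-- so adding c to the existing set leaves the residual pool unchanged
theorem pool_filter_add (existing : PySem.Set Int) (c : Int) :
    ((PySem.List.pyRange (c + 1) 0xF900 1).filter fun x => !(PySem.Set.contains (PySem.Set.add existing c) x)) =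
    ((PySem.List.pyRange (c + 1) 0xF900 1).filter fun x => !(PySem.Set.contains existing x)) := by
  apply List.filter_congr
  intro x hx
  have hge : c + 1 ≤ x := (PySem.List.mem_pyRange_one.mp hx).1
  have hne : x ≠ c := by omega
  have hkey : PySem.Set.contains (PySem.Set.add existing c) x = PySem.Set.contains existing x := by
    by_cases hmem : x ∈ existing
    · rw [(PySem.Set.contains_iff _ _).mpr ((PySem.Set.mem_add _ _ _).mpr (Or.inl hmem)),
        (PySem.Set.contains_iff _ _).mpr hmem]
    · have h1 : x ∉ PySem.Set.add existing c := fun hm =>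
        ((PySem.Set.mem_add _ _ _).mp hm).elim hmem hne
      cases ha : PySem.Set.contains (PySem.Set.add existing c) x
      · cases hb : PySem.Set.contains existing x
        · rfl
        · exact absurd ((PySem.Set.contains_iff _ _).mp hb) hmem
      · exact absurd ((PySem.Set.contains_iff _ _).mp ha) h1
  rw [hkey]

-- A-loop correspondence: A's (existing, next_pua) state corresponds to the residual pool
theorem loop_correspondence (l : List (Int × Int)) :
    ∀ (existing : PySem.Set Int) (np : Int) (d : PySem.Dict Int Int), np ≤ 0xF900 →
    pvALoop l existing np d =
      pvBHead l ((PySem.List.pyRange np 0xF900 1).filter fun c => !(PySem.Set.contains existing c)) d := by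
  induction l with
  | nil => intro existing np d _; rfl
  | cons hd rest ih =>
    intro existing np d hnp
    obtain ⟨code, v⟩ := hd
    by_cases hv : pvAIsInvalid v = true
    · rcases hpool : ((PySem.List.pyRange np 0xF900 1).filter fun c => !(PySem.Set.contains existing c)) with _ | ⟨c, ps⟩
      · have hw := (pvAWhile_spec np hnp existing).1 hpool
        rw [pvALoop, pvBHead.eq_def]
        simp only [hv, ite_true, hw]
        rw [if_neg (by omega)]
        have hres : ((PySem.List.pyRange (0xF900 : Int) 0xF900 1).filter fun c => !(PySem.Set.contains existing c)) = [] := by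
          rw [PySem.List.pyRange_one_eq_nil (by omega)]; rfl
        rw [ih existing 0xF900 d (by omega), hres]
      · obtain ⟨hw, hnpc, hcle, hps⟩ := (pvAWhile_spec np hnp existing).2 c ps hpool
        rw [pvALoop, pvBHead.eq_def]
        simp only [hv, ite_true, hw]
        rw [if_pos hcle]
        rw [ih (PySem.Set.add existing c) (c + 1) (d.insert code c) (by omega)]
        rw [pool_filter_add, ← hps]
    · rw [pvALoop, pvBHead.eq_def]
      simp only [hv, ite_false, Bool.false_eq_true]
      exact ih existing np (d.insert code v) hnp

-- B's indexed final pass equals head-consumption of the remaining free list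
theorem pvBFinal_eq_head (l : List (Int × Int)) :
    ∀ (free : List Int) (j : Nat) (d : PySem.Dict Int Int),
      pvBFinal l free j d = pvBHead l (free.drop j) d := by
  induction l with
  | nil => intro free j d; rfl
  | cons hd rest ih =>
    intro free j d
    obtain ⟨code, v⟩ := hd
    by_cases hv : pvAIsInvalid v = true
    · rw [pvBFinal, pvBHead.eq_def]
      simp only [hv, ite_true]
      by_cases hj : j < free.length
      · have hdrop : free.drop j = free[j] :: free.drop (j + 1) := List.drop_eq_getElem_cons hj
        rw [List.getElem?_eq_getElem hj, hdrop]
        exact ih free (j + 1) (d.insert code free[j])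
      · have hnone : free[j]? = none := List.getElem?_eq_none (by omega)
        have h1 : free.drop j = [] := List.drop_eq_nil_of_le (by omega)
        have h2 : free.drop (j + 1) = [] := List.drop_eq_nil_of_le (by omega)
        rw [hnone, h1]
        rw [ih free (j + 1) d, h2]
    · rw [pvBFinal, pvBHead.eq_def]
      simp only [hv, ite_false, Bool.false_eq_true]
      exact ih free j (d.insert code v)

-- truncating the pool to (at least) the number of invalid entries changes nothing
theorem pvBHead_take (l : List (Int × Int)) :
    ∀ (pool : List Int) (k : Nat) (d : PySem.Dict Int Int),
      l.countP (fun p => pvAIsInvalid p.2) ≤ k →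
      pvBHead l (pool.take k) d = pvBHead l pool d := by
  induction l with
  | nil => intro pool k d _; rfl
  | cons hd rest ih =>
    intro pool k d hk
    obtain ⟨code, v⟩ := hd
    by_cases hv : pvAIsInvalid v = true
    · have hcnt : rest.countP (fun p => pvAIsInvalid p.2) + 1 ≤ k := by
        simp only [List.countP_cons, hv, if_true] at hk
        omega
      rcases pool with _ | ⟨p, ps⟩
      · simp only [List.take_nil]
      · rcases k with _ | k'
        · omega
        · rw [List.take_succ_cons]
          show (if pvAIsInvalid v then pvBHead rest (List.take k' ps) (d.insert code p) else _) =
               (if pvAIsInvalid v then pvBHead rest ps (d.insert code p) else _)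
          simp only [hv, ite_true]
          exact ih ps k' (d.insert code p) (by omega)
    · have hcnt : rest.countP (fun p => pvAIsInvalid p.2) ≤ k := by
        simp only [List.countP_cons, hv] at hk
        omega
      show (if pvAIsInvalid v then _ else pvBHead rest (pool.take k) (d.insert code v)) =
           (if pvAIsInvalid v then _ else pvBHead rest pool (d.insert code v))
      simp only [hv, ite_false, Bool.false_eq_true]
      exact ih pool k (d.insert code v) hcnt

-- the gap collection over a strictly increasing, bounded list of used values is
-- exactly the range with the used values filtered out
theorem pvBGaps_eq (us : List Int) : ∀ (prev T : Int),
    us.Pairwise (· < ·) → (∀ u ∈ us, prev ≤ u ∧ u < T) →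
    pvBGaps prev (us ++ [T]) = (PySem.List.pyRange prev T 1).filter (fun c => decide (c ∉ us)) := by
  induction us with
  | nil =>
    intro prev T _ _
    simp [pvBGaps]
  | cons u rest ih =>
    intro prev T hp hb
    obtain ⟨hpu, huT⟩ := hb u (by simp)
    have hrlt : ∀ x ∈ rest, u < x := (List.pairwise_cons.mp hp).1
    have hrest : ∀ x ∈ rest, u + 1 ≤ x ∧ x < T := fun x hx =>
      ⟨by have := hrlt x hx; omega, (hb x (by simp [hx])).2⟩
    rw [List.cons_append, pvBGaps, ih (u + 1) T (List.pairwise_cons.mp hp).2 hrest]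
    rw [PySem.List.pyRange_one_append prev u T hpu (by omega),
        PySem.List.pyRange_one_cons huT, List.filter_append, List.filter_cons]
    have hmem : (decide (u ∉ u :: rest)) = false := by simp
    rw [hmem]
    simp only [Bool.false_eq_true, if_false]
    have h1 : (PySem.List.pyRange prev u 1).filter (fun c => decide (c ∉ u :: rest)) =
        PySem.List.pyRange prev u 1 := by
      apply List.filter_eq_self.mpr
      intro x hx
      have hxu : x < u := (PySem.List.mem_pyRange_one.mp hx).2
      simp only [decide_eq_true_eq, List.mem_cons]
      rintro (rfl | hxr)
      · omega
      · exact absurd (hrlt x hxr) (by omega)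
    have h2 : (PySem.List.pyRange (u + 1) T 1).filter (fun c => decide (c ∉ u :: rest)) =
        (PySem.List.pyRange (u + 1) T 1).filter (fun c => decide (c ∉ rest)) := by
      apply List.filter_congr
      intro x hx
      have hxu : u + 1 ≤ x := (PySem.List.mem_pyRange_one.mp hx).1
      simp only [List.mem_cons, decide_eq_decide]
      constructor
      · intro h hr; exact h (Or.inr hr)
      · rintro h (rfl | hr)
        · omega
        · exact h hr
    rw [h1, h2]

-- ===== VERDICT (by name: the statement is the Claim_ definition above) =====
theorem filter_invalid_unicode_values_spec : Claim_equal_filter_invalid_unicode_values := by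
  intro l _
  unfold Spec_filter_invalid_unicode_values
  simp only [filter_invalid_unicode_values, filter_invalid_unicode_values_alt]
  by_cases h0 : (l.countP fun p => pvAIsInvalid p.2) = 0
  · have hA : ¬ (l.any fun p => pvAIsInvalid p.2) = true := by
      simp only [List.any_eq_true, not_exists]
      intro x hx
      exact absurd hx.2 (List.countP_eq_zero.mp h0 x hx.1)
    rw [if_pos hA, if_pos h0]
  · have hA : ¬ ¬ (l.any fun p => pvAIsInvalid p.2) = true := by
      simp only [List.any_eq_true, not_not]
      rcases List.countP_pos_iff.mp (Nat.pos_of_ne_zero h0) with ⟨x, hx, hpx⟩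
      exact ⟨x, hx, hpx⟩
    rw [if_neg hA, if_neg h0]
    set existing : PySem.Set Int :=
      PySem.Set.ofList ((l.map Prod.snd).filter fun v => 0xE000 ≤ v && v ≤ 0xF8FF) with hex
    set used : List Int := PySem.List.sorted existing (fun x => x) false with huse
    have hsorted : used.Pairwise (· < ·) := by
      rw [huse, hex]; exact PySem.List.sorted_ofList_pairwise_lt _
    have hbounds : ∀ u ∈ used, (0xE000 : Int) ≤ u ∧ u < 0xF900 := by
      intro u hu
      have : u ∈ existing := (PySem.List.mem_sorted _ _ _ _).mp hu
      rw [hex] at this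
      have := (PySem.Set.mem_ofList _ _).mp this
      have := List.of_mem_filter this
      simp only [Bool.and_eq_true, decide_eq_true_eq] at this
      omega
    rw [loop_correspondence l existing 0xE000 PySem.Dict.empty (by omega)]
    rw [pvBFinal_eq_head, List.drop_zero]
    rw [pvBGaps_eq used 0xE000 0xF900 hsorted hbounds]
    have hfilters : ((PySem.List.pyRange (0xE000 : Int) 0xF900 1).filter (fun c => decide (c ∉ used))) =
        ((PySem.List.pyRange (0xE000 : Int) 0xF900 1).filter fun c => !(PySem.Set.contains existing c)) := by
      apply List.filter_congr
      intro x _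
      by_cases hm : x ∈ existing
      · rw [(PySem.Set.contains_iff _ _).mpr hm]
        simp [huse, PySem.List.mem_sorted, hm]
      · have hc : PySem.Set.contains existing x = false := by
          cases hcc : PySem.Set.contains existing x
          · rfl
          · exact absurd ((PySem.Set.contains_iff _ _).mp hcc) hm
        rw [hc]
        simp [huse, PySem.List.mem_sorted, hm]
    rw [hfilters]
    rw [pvBHead_take l _ _ PySem.Dict.empty (le_refl _)]
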